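-- pv_equiv track=rewrite | github.com/bp274/HackerRank | Algorithms/Implementation/Beautiful Triplets.py | beautifulTriplets
-- ===== SOURCE A (Python) =====
-- def beautifulTriplets(d, arr):
--     numberOfBeautifulTriplets = 0
--     for i in range(len(arr) - 2):
--         for j in range(i + 1, len(arr) - 1):
--             tripletFound = False
--             if arr[j] == arr[i] + d:
--                 for k in range(j + 1, len(arr)):
--                     if arr[k] == arr[j] + d:
--                         numberOfBeautifulTriplets = numberOfBeautifulTriplets + 1
--                         tripletFound = True
--                         break
--             if tripletFound:
--                 break
--
--     return numberOfBeautifulTriplets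
-- ===== SOURCE B (Python) =====
-- def beautifulTriplets(d, arr):
--     # O(n): last occurrence of each value, then one reverse pass maintaining
--     # the first occurrence of each value to the right of i.
--     last = {}
--     for i in range(len(arr)):
--         last[arr[i]] = i
--     nxt = {}
--     count = 0
--     for i in reversed(range(len(arr))):
--         v = arr[i]
--         j = nxt.get(v + d)
--         k = last.get(v + 2 * d)
--         if j is not None and k is not None and j < k:
--             count += 1
--         nxt[v] = i
--     return count
-- ===== Notes on version B (the rewrite author's own statement) =====
-- stated objective: faster
-- what changed: Replaced the triple nested scan with break flags by two dictionary passes: a last-occurrence map built once, then a single reverse pass maintaining a first-occurrence-after-i map, counting i when the earliest j>i with arr[j]=arr[i]+d lies before the last occurrence of arr[i]+2d.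
import Mathlib
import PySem

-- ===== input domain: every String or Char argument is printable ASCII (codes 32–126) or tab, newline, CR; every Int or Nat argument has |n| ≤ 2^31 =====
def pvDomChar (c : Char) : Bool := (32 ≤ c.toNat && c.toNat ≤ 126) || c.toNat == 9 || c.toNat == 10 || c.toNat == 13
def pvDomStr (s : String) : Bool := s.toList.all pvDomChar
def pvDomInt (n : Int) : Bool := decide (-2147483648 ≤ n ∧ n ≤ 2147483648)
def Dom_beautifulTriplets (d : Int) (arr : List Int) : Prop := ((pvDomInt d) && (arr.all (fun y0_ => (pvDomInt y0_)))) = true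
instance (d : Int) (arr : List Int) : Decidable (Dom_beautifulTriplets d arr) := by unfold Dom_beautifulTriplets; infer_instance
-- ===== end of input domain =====

-- B replaces A's triple nested scan (with break flags) by two dictionary passes:
-- a last-occurrence map built once, then a single reverse pass maintaining a
-- first-occurrence-after-i map.

-- ===== PORT A =====
-- the k-loop: scan k-indices, stop at the first arr[k] == arr[j] + d
def btK (d : Int) (arr : List Int) (aj : Int) : List Int → Bool
  | [] => false
  | k :: rest =>
    if PySem.List.pyGetD arr k 0 == aj + d then true else btK d arr aj rest

-- the j-loop: contributes 1 and breaks when a triplet is found, else continues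
def btJ (d : Int) (arr : List Int) (ai : Int) (n : Int) : List Int → Int
  | [] => 0
  | j :: rest =>
    if PySem.List.pyGetD arr j 0 == ai + d then
      if btK d arr (PySem.List.pyGetD arr j 0) (PySem.List.pyRange (j + 1) n 1) then 1
      else btJ d arr ai n rest
    else btJ d arr ai n rest

def beautifulTriplets (d : Int) (arr : List Int) : Int :=
  let n : Int := (arr.length : Int)
  (PySem.List.pyRange 0 (n - 2) 1).foldl
    (fun acc i =>
      acc + btJ d arr (PySem.List.pyGetD arr i 0) n (PySem.List.pyRange (i + 1) (n - 1) 1)) 0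

-- ===== PORT B =====
def beautifulTriplets_alt (d : Int) (arr : List Int) : Int :=
  let n : Int := (arr.length : Int)
  let last : PySem.Dict Int Int :=
    (PySem.List.pyRange 0 n 1).foldl
      (fun dct i => dct.insert (PySem.List.pyGetD arr i 0) i) PySem.Dict.empty
  let st :=
    (PySem.List.pyRange 0 n 1).reverse.foldl
      (fun (st : PySem.Dict Int Int × Int) i =>
        let v := PySem.List.pyGetD arr i 0
        let cnt := match st.1.get? (v + d), last.get? (v + 2 * d) with
          | some j, some k => if j < k then st.2 + 1 else st.2
          | _, _ => st.2
        (st.1.insert v i, cnt)) (PySem.Dict.empty, 0)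
  st.2

-- ===== PRECONDITION & SPEC =====
def Spec_beautifulTriplets (d : Int) (arr : List Int) (out : Int) : Prop := out = beautifulTriplets_alt d arr
instance (d : Int) (arr : List Int) (out : Int) : Decidable (Spec_beautifulTriplets d arr out) := by unfold Spec_beautifulTriplets; infer_instance

-- ===== CLAIM (what is proved, stated in full; the proofs are below) =====
def Claim_equal_beautifulTriplets : Prop := ∀ (d : Int) (arr : List Int), Dom_beautifulTriplets d arr → Spec_beautifulTriplets d arr (beautifulTriplets d arr)

-- ===== LEMMAS AND PROOFS =====

def firstGe (arr : List Int) (i : Nat) (x : Int) : Option Nat :=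
  if h : i < arr.length then
    if arr.getD i 0 == x then some i else firstGe arr (i + 1) x
  else none
termination_by arr.length - i

-- last index < t holding value x (none if absent)
def lastLt (arr : List Int) : Nat → Int → Option Nat
  | 0, _ => none
  | t + 1, x => if arr.getD t 0 == x then some t else lastLt arr t x

-- the common specification: does index i start a beautiful triplet?
def okAt (d : Int) (arr : List Int) (i : Nat) : Bool :=
  let v := arr.getD i 0
  match firstGe arr (i + 1) (v + d), lastLt arr arr.length (v + 2 * d) with
  | some j, some k => decide (j < k)
  | _, _ => false

theorem firstGe_some (arr : List Int) (i : Nat) (x : Int) (j : Nat)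
    (h : firstGe arr i x = some j) :
    i ≤ j ∧ j < arr.length ∧ arr.getD j 0 = x := by
  revert h
  fun_induction firstGe arr i x with
  | case1 i h1 h2 =>
    intro h; obtain rfl : i = j := by simpa using h
    exact ⟨le_refl _, h1, by simpa using h2⟩
  | case2 i h1 h2 ih =>
    intro h; obtain ⟨h3, h4, h5⟩ := ih h
    exact ⟨by omega, h4, h5⟩
  | case3 i h1 => intro h; simp at h

theorem firstGe_le (arr : List Int) (i m : Nat) (x : Int)
    (him : i ≤ m) (hm : m < arr.length) (hx : arr.getD m 0 = x) :
    ∃ j, firstGe arr i x = some j ∧ j ≤ m := by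
  fun_induction firstGe arr i x with
  | case1 i h1 h2 => exact ⟨i, rfl, him⟩
  | case2 i h1 h2 ih =>
    rcases Nat.eq_or_lt_of_le him with rfl | hlt
    · simp_all
    · obtain ⟨j, hj, hjm⟩ := ih hlt
      exact ⟨j, hj, hjm⟩
  | case3 i h1 => omega

theorem lastLt_some (arr : List Int) (t : Nat) (x : Int) (k : Nat)
    (h : lastLt arr t x = some k) : k < t ∧ arr.getD k 0 = x := by
  induction t with
  | zero => simp [lastLt] at h
  | succ t ih =>
    simp only [lastLt] at h
    split at h
    · obtain rfl : t = k := by simpa using h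
      exact ⟨by omega, by simpa using ‹(arr.getD t 0 == x) = true›⟩
    · have := ih h; exact ⟨by omega, this.2⟩

theorem lastLt_ge (arr : List Int) (t m : Nat) (x : Int)
    (hm : m < t) (hx : arr.getD m 0 = x) :
    ∃ k, lastLt arr t x = some k ∧ m ≤ k := by
  induction t with
  | zero => omega
  | succ t ih =>
    simp only [lastLt]
    split
    · exact ⟨t, rfl, by omega⟩
    · rcases Nat.lt_succ_iff_lt_or_eq.1 hm with h | rfl
      · exact ih h
      · simp_all

theorem btK_any (d : Int) (arr : List Int) (aj : Int) (ks : List Int) :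
    btK d arr aj ks = ks.any (fun k => PySem.List.pyGetD arr k 0 == aj + d) := by
  induction ks with
  | nil => rfl
  | cons k rest ih =>
    simp only [btK, List.any_cons]
    split <;> simp_all

theorem btJ_ite (d : Int) (arr : List Int) (ai : Int) (n : Int) (js : List Int) :
    btJ d arr ai n js =
      if js.any (fun j => (PySem.List.pyGetD arr j 0 == ai + d)
          && btK d arr (PySem.List.pyGetD arr j 0) (PySem.List.pyRange (j + 1) n 1)) then 1 else 0 := by
  induction js with
  | nil => rfl
  | cons j rest ih =>
    simp only [btJ, List.any_cons]
    split_ifs with h1 h2 <;> simp_all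

theorem btJ_eq_okAt (d : Int) (arr : List Int) (i : Nat) :
    btJ d arr (arr.getD i 0) (arr.length : Int)
      (PySem.List.pyRange ((i : Int) + 1) ((arr.length : Int) - 1) 1)
      = if okAt d arr i then 1 else 0 := by
  rw [btJ_ite]
  congr 1
  set v := arr.getD i 0 with hv
  have key : (PySem.List.pyRange ((i : Int) + 1) ((arr.length : Int) - 1) 1).any
      (fun j => (PySem.List.pyGetD arr j 0 == v + d)
        && btK d arr (PySem.List.pyGetD arr j 0) (PySem.List.pyRange (j + 1) (arr.length : Int) 1))
      = okAt d arr i := by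
    rw [Bool.eq_iff_iff]
    constructor
    · intro h
      obtain ⟨j, hjmem, hj⟩ := List.any_eq_true.1 h
      obtain ⟨hj1, hj2⟩ := PySem.List.mem_pyRange_one.1 hjmem
      rw [Bool.and_eq_true] at hj
      obtain ⟨hjv, hkex⟩ := hj
      rw [btK_any] at hkex
      obtain ⟨k, hkmem, hkv⟩ := List.any_eq_true.1 hkex
      obtain ⟨hk1, hk2⟩ := PySem.List.mem_pyRange_one.1 hkmem
      -- to Nat indices
      obtain ⟨jn, rfl⟩ : ∃ jn : Nat, j = (jn : Int) := ⟨j.toNat, by omega⟩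
      obtain ⟨kn, rfl⟩ : ∃ kn : Nat, k = (kn : Int) := ⟨k.toNat, by omega⟩
      rw [PySem.List.pyGetD_natCast] at hjv hkv
      have hjv' : arr.getD jn 0 = v + d := by simpa using hjv
      have hkv' : arr.getD kn 0 = v + 2 * d := by
        have := (beq_iff_eq).1 hkv
        rw [PySem.List.pyGetD_natCast, hjv'] at this
        rw [this]; ring
      obtain ⟨j0, hj0, hj0le⟩ := firstGe_le arr (i + 1) jn (v + d) (by omega) (by omega) hjv'
      obtain ⟨k0, hk0, hk0ge⟩ := lastLt_ge arr arr.length kn (v + 2 * d) (by omega) hkv'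
      simp only [okAt, ← hv, hj0, hk0]
      exact decide_eq_true (by omega)
    · intro h
      simp only [okAt, ← hv] at h
      rcases h1 : firstGe arr (i + 1) (v + d) with _ | j0 <;> rw [h1] at h
      · simp at h
      rcases h2 : lastLt arr arr.length (v + 2 * d) with _ | k0 <;> rw [h2] at h
      · simp at h
      have hlt : j0 < k0 := by simpa using h
      obtain ⟨hj1, hj2, hj3⟩ := firstGe_some arr (i + 1) (v + d) j0 h1
      obtain ⟨hk1, hk2⟩ := lastLt_some arr arr.length (v + 2 * d) k0 h2
      refine List.any_eq_true.2 ⟨(j0 : Int), PySem.List.mem_pyRange_one.2 ⟨by omega, by omega⟩, ?_⟩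
      rw [Bool.and_eq_true, PySem.List.pyGetD_natCast]
      refine ⟨beq_iff_eq.2 hj3, ?_⟩
      rw [btK_any]
      refine List.any_eq_true.2 ⟨(k0 : Int), PySem.List.mem_pyRange_one.2 ⟨by omega, by omega⟩, ?_⟩
      rw [PySem.List.pyGetD_natCast]
      exact beq_iff_eq.2 (by rw [hk2, hj3]; ring)
  rw [key]

theorem okAt_bound (d : Int) (arr : List Int) (i : Nat) (h : okAt d arr i = true) :
    i + 2 < arr.length := by
  simp only [okAt] at h
  rcases h1 : firstGe arr (i + 1) (arr.getD i 0 + d) with _ | j0 <;> rw [h1] at h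
  · simp at h
  rcases h2 : lastLt arr arr.length (arr.getD i 0 + 2 * d) with _ | k0 <;> rw [h2] at h
  · simp at h
  have hlt : j0 < k0 := by simpa using h
  obtain ⟨hj1, hj2, -⟩ := firstGe_some arr (i + 1) _ j0 h1
  obtain ⟨hk1, -⟩ := lastLt_some arr arr.length _ k0 h2
  omega

theorem A_eq_countP (d : Int) (arr : List Int) :
    beautifulTriplets d arr
      = ((List.range (arr.length - 2)).countP (fun i => okAt d arr i) : Int) := by
  unfold beautifulTriplets
  rw [PySem.List.foldl_add, zero_add, PySem.List.pyRange_one]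
  have hn : (((arr.length : Int) - 2) - 0).toNat = arr.length - 2 := by omega
  rw [hn, List.map_map]
  have : ∀ k : Nat,
      btJ d arr (PySem.List.pyGetD arr ((0 : Int) + (k : Int)) 0) (arr.length : Int)
        (PySem.List.pyRange (((0 : Int) + (k : Int)) + 1) ((arr.length : Int) - 1) 1)
      = if okAt d arr k then 1 else 0 := by
    intro k
    rw [zero_add, PySem.List.pyGetD_natCast]
    exact btJ_eq_okAt d arr k
  calc (List.map ((fun i => btJ d arr (PySem.List.pyGetD arr i 0) (arr.length : Int)
          (PySem.List.pyRange (i + 1) ((arr.length : Int) - 1) 1)) ∘ fun k : Nat => (0 : Int) + (k : Int))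
        (List.range (arr.length - 2))).sum
      = (List.map (fun k : Nat => if okAt d arr k then (1 : Int) else 0)
          (List.range (arr.length - 2))).sum := by
        apply congrArg
        apply List.map_congr_left
        intro k _
        exact this k
    _ = _ := PySem.List.sum_map_ite_one_zero _ _

theorem countP_range_eq (d : Int) (arr : List Int) :
    (List.range arr.length).countP (fun i => okAt d arr i)
      = (List.range (arr.length - 2)).countP (fun i => okAt d arr i) := by
  have hsplit : arr.length = (arr.length - 2) + (arr.length - (arr.length - 2)) := by omega
  conv_lhs => rw [hsplit, List.range_add, List.countP_append]
  have : (List.map (fun x => arr.length - 2 + x) (List.range (arr.length - (arr.length - 2)))).countP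
      (fun i => okAt d arr i) = 0 := by
    apply List.countP_eq_zero.2
    intro x hx
    simp only [List.mem_map, List.mem_range] at hx
    obtain ⟨y, hy, rfl⟩ := hx
    intro hok
    have := okAt_bound d arr _ hok
    omega
  rw [this]
  omega

def stepB (d : Int) (arr : List Int) (last : PySem.Dict Int Int)
    (st : PySem.Dict Int Int × Int) (i : Int) : PySem.Dict Int Int × Int :=
  let v := PySem.List.pyGetD arr i 0
  let cnt := match st.1.get? (v + d), last.get? (v + 2 * d) with
    | some j, some k => if j < k then st.2 + 1 else st.2
    | _, _ => st.2
  (st.1.insert v i, cnt)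

theorem lastDict_get? (arr : List Int) (t : Nat) (x : Int) :
    (((List.range t).map (fun k : Nat => (k : Int))).foldl
        (fun dct i => dct.insert (PySem.List.pyGetD arr i 0) i) PySem.Dict.empty).get? x
      = (lastLt arr t x).map (fun k : Nat => (k : Int)) := by
  induction t with
  | zero => simp [lastLt, PySem.Dict.get?_empty]
  | succ t ih =>
    rw [List.range_succ, List.map_append, List.foldl_append]
    simp only [List.map_cons, List.map_nil, List.foldl_cons, List.foldl_nil]
    rw [PySem.Dict.get?_insert, PySem.List.pyGetD_natCast]
    simp only [lastLt]
    by_cases hx : x = arr.getD t 0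
    · rw [if_pos hx, if_pos (by simp [hx])]
      rfl
    · rw [if_neg hx, if_neg (by simpa using (Ne.symm hx)), ih]

theorem loopB_inv (d : Int) (arr : List Int) (last : PySem.Dict Int Int)
    (hlast : ∀ x, last.get? x = (lastLt arr arr.length x).map (fun k : Nat => (k : Int)))
    (t : Nat) (ht : t ≤ arr.length) :
    (∀ x, ((((List.range' (arr.length - t) t).map (fun k : Nat => (k : Int))).reverse.foldl
        (stepB d arr last) (PySem.Dict.empty, 0)).1.get? x
          = (firstGe arr (arr.length - t) x).map (fun k : Nat => (k : Int)))) ∧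
    ((((List.range' (arr.length - t) t).map (fun k : Nat => (k : Int))).reverse.foldl
        (stepB d arr last) (PySem.Dict.empty, 0)).2
      = ((List.range' (arr.length - t) t).countP (fun i => okAt d arr i) : Int)) := by
  induction t with
  | zero =>
    constructor
    · intro x
      rw [firstGe]
      simp [PySem.Dict.get?_empty]
    · simp
  | succ t ih =>
    have ha : arr.length - t = (arr.length - (t + 1)) + 1 := by omega
    set a := arr.length - (t + 1) with hadef
    have halen : a < arr.length := by omega
    obtain ⟨ihd, ihc⟩ := ih (by omega)
    rw [ha] at ihd ihc
    have hlist : (List.range' a (t + 1)).map (fun k : Nat => (k : Int))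
        = (a : Int) :: (List.range' (a + 1) t).map (fun k : Nat => (k : Int)) := by
      rw [List.range'_succ, List.map_cons]
    rw [hlist]
    rw [List.reverse_cons, List.foldl_append, List.foldl_cons, List.foldl_nil]
    set prev := ((List.range' (a + 1) t).map (fun k : Nat => (k : Int))).reverse.foldl
        (stepB d arr last) (PySem.Dict.empty, 0) with hprev
    have hv : PySem.List.pyGetD arr ((a : Nat) : Int) 0 = arr.getD a 0 :=
      PySem.List.pyGetD_natCast arr a 0
    constructor
    · intro x
      show ((prev.1.insert (PySem.List.pyGetD arr ((a : Nat) : Int) 0) ((a : Nat) : Int)).get? x)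
        = (firstGe arr a x).map (fun k : Nat => (k : Int))
      rw [PySem.Dict.get?_insert, hv, firstGe]
      rw [dif_pos halen]
      by_cases hx : x = arr.getD a 0
      · rw [if_pos hx, if_pos (by simp [hx])]
        rfl
      · rw [if_neg hx, if_neg (by simpa using (Ne.symm hx)), ihd x]
    · show (match prev.1.get? (PySem.List.pyGetD arr ((a : Nat) : Int) 0 + d),
            last.get? (PySem.List.pyGetD arr ((a : Nat) : Int) 0 + 2 * d) with
        | some j, some k => if j < k then prev.2 + 1 else prev.2
        | _, _ => prev.2)
        = ((List.range' a (t + 1)).countP (fun i => okAt d arr i) : Int)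
      rw [List.range'_succ, List.countP_cons, hv, ihd, hlast, ihc]
      have hok : okAt d arr a
          = (match firstGe arr (a + 1) (arr.getD a 0 + d),
                  lastLt arr arr.length (arr.getD a 0 + 2 * d) with
             | some j0, some k0 => decide (j0 < k0)
             | _, _ => false) := rfl
      rcases h1 : firstGe arr (a + 1) (arr.getD a 0 + d) with _ | j0 <;>
        rcases h2 : lastLt arr arr.length (arr.getD a 0 + 2 * d) with _ | k0 <;>
        rw [h1, h2] at hok <;>
        simp only [Option.map_none, Option.map_some, hok] <;>
        (try (simp; done))
      by_cases hjk : j0 < k0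
      · rw [if_pos (by exact_mod_cast hjk), decide_eq_true hjk]
        simp
        try omega
      · rw [if_neg (by exact_mod_cast hjk), decide_eq_false hjk]
        simp
        try omega

theorem B_eq_countP (d : Int) (arr : List Int) :
    beautifulTriplets_alt d arr
      = ((List.range arr.length).countP (fun i => okAt d arr i) : Int) := by
  unfold beautifulTriplets_alt
  simp only []
  rw [PySem.List.pyRange_zero_nat]
  have hlast : ∀ x, ((List.map (fun k : Nat => (k : Int)) (List.range arr.length)).foldl
      (fun dct i => dct.insert (PySem.List.pyGetD arr i 0) i) PySem.Dict.empty).get? x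
        = (lastLt arr arr.length x).map (fun k : Nat => (k : Int)) :=
    fun x => lastDict_get? arr arr.length x
  have H := (loopB_inv d arr _ hlast arr.length (le_refl _)).2
  rw [Nat.sub_self] at H
  rw [← List.range_eq_range'] at H
  exact H

-- ===== VERDICT (by name: the statement is the Claim_ definition above) =====
theorem beautifulTriplets_spec : Claim_equal_beautifulTriplets := by
  intro d arr _
  unfold Spec_beautifulTriplets
  rw [A_eq_countP, B_eq_countP, countP_range_eq]
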